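-- pv_equiv track=rewrite | github.com/rafael5/vehu-docker-dev | src/vista_fm_browser/type_codes.py | _read_decimal
-- ===== SOURCE A (Python) =====
-- def _read_decimal(s: str) -> tuple[str, str]:
--     """Read a leading decimal (digits and one dot) and return (num, rest)."""
--     num_chars: list[str] = []
--     seen_dot = False
--     i = 0
--     for i, c in enumerate(s):
--         if c.isdigit():
--             num_chars.append(c)
--         elif c == "." and not seen_dot:
--             seen_dot = True
--             num_chars.append(c)
--         else:
--             return "".join(num_chars), s[i:]
--     return "".join(num_chars), ""
-- ===== SOURCE B (Python) =====
-- def _read_decimal(s: str) -> tuple[str, str]: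
--     """Read a leading decimal (digits and one dot) and return (num, rest)."""
--     i = 0
--     n = len(s)
--     while i < n and s[i].isdigit():
--         i += 1
--     if i < n and s[i] == ".":
--         i += 1
--         while i < n and s[i].isdigit():
--             i += 1
--     return s[:i], s[i:]
-- ===== Notes on version B (the rewrite author's own statement) =====
-- stated objective: simpler
-- what changed: Replaced the per-character accumulator loop with a seen_dot flag by a three-phase index scan (digits, optional one dot, digits) that returns two slices of s; no list building or join.
import Mathlib
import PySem

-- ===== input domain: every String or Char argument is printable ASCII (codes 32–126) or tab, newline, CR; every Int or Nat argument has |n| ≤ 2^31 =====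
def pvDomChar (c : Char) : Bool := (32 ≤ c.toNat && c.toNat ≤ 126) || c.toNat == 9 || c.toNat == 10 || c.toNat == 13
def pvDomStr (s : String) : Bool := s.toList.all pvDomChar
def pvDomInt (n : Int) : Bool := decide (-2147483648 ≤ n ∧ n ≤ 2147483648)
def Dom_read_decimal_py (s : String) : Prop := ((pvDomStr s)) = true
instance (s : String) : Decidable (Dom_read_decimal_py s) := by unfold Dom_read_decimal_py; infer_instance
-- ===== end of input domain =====

-- B replaces A's accumulator loop with a seen_dot flag by a three-phase index scan
-- (digits, optional one dot, digits) returning two slices; objective: simpler.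

-- ===== PORT A =====
-- The loop consumes one char per step, so the remaining list at each step is s[i:];
-- num_chars is accumulated in order (acc ++ [c] = append). Char.isDigit is exact for
-- Python str.isdigit on the ASCII domain.
def readDecLoopA : List Char → List Char → Bool → String × String
  | [], acc, _ => (String.mk acc, "")
  | c :: cs, acc, seen =>
    if c.isDigit then readDecLoopA cs (acc ++ [c]) seen
    else if c = '.' ∧ ¬(seen = true) then readDecLoopA cs (acc ++ [c]) true
    else (String.mk acc, String.mk (c :: cs))

def read_decimal_py (s : String) : String × String :=
  readDecLoopA s.toList [] false

-- ===== PORT B =====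
-- countDigits l = length of the maximal digit prefix (B's `while i < n and s[i].isdigit()`).
def countDigits : List Char → Nat
  | [] => 0
  | c :: cs => if c.isDigit then countDigits cs + 1 else 0

def read_decimal_py_alt (s : String) : String × String :=
  let l := s.toList
  let i := countDigits l
  let j :=
    match l.drop i with
    | '.' :: r => i + 1 + countDigits r
    | _ => i
  (String.mk (l.take j), String.mk (l.drop j))

-- ===== PRECONDITION & SPEC =====
def Spec_read_decimal_py (s : String) (out : String × String) : Prop := out = read_decimal_py_alt s
instance (s : String) (out : String × String) : Decidable (Spec_read_decimal_py s out) := by unfold Spec_read_decimal_py; infer_instance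

-- ===== CLAIM (what is proved, stated in full; the proofs are below) =====
def Claim_equal_read_decimal_py : Prop := ∀ (s : String), Dom_read_decimal_py s → Spec_read_decimal_py s (read_decimal_py s)

-- ===== LEMMAS AND PROOFS =====

theorem take_countDigits (l : List Char) : l.take (countDigits l) = l.takeWhile Char.isDigit := by
  induction l with
  | nil => rfl
  | cons c cs ih =>
    by_cases h : c.isDigit <;> simp [countDigits, List.takeWhile, h, ih]

theorem drop_countDigits (l : List Char) : l.drop (countDigits l) = l.dropWhile Char.isDigit := by
  induction l with
  | nil => rfl
  | cons c cs ih =>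
    by_cases h : c.isDigit <;> simp [countDigits, List.dropWhile, h, ih]

-- after a dot has been seen, A's loop just consumes the remaining digit prefix
theorem loopA_true (l acc : List Char) :
    readDecLoopA l acc true =
      (String.mk (acc ++ l.takeWhile Char.isDigit), String.mk (l.dropWhile Char.isDigit)) := by
  induction l generalizing acc with
  | nil => simp [readDecLoopA, List.takeWhile, List.dropWhile]; decide
  | cons c cs ih =>
    by_cases h : c.isDigit
    · simp [readDecLoopA, List.takeWhile, List.dropWhile, h, ih]
    · simp [readDecLoopA, List.takeWhile, List.dropWhile, h]

-- closed form of A's loop before any dot: B's three-phase decomposition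
theorem loopA_false (l acc : List Char) :
    readDecLoopA l acc false =
      match l.dropWhile Char.isDigit with
      | '.' :: r =>
        (String.mk (acc ++ l.takeWhile Char.isDigit ++ '.' :: r.takeWhile Char.isDigit),
         String.mk (r.dropWhile Char.isDigit))
      | _ => (String.mk (acc ++ l.takeWhile Char.isDigit), String.mk (l.dropWhile Char.isDigit)) := by
  induction l generalizing acc with
  | nil => simp [readDecLoopA, List.takeWhile, List.dropWhile]; decide
  | cons c cs ih =>
    by_cases h : c.isDigit
    · simpa [readDecLoopA, List.takeWhile, List.dropWhile, h] using ih (acc ++ [c])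
    · by_cases hd : c = '.'
      · subst hd
        simp [readDecLoopA, List.takeWhile, List.dropWhile, h, loopA_true]
      · simp [readDecLoopA, List.takeWhile, List.dropWhile, h, hd]

-- ===== VERDICT (by name: the statement is the Claim_ definition above) =====
theorem read_decimal_py_spec : Claim_equal_read_decimal_py := by
  intro s _
  unfold Spec_read_decimal_py read_decimal_py read_decimal_py_alt
  rw [loopA_false]
  have hd := drop_countDigits s.toList
  have ht := take_countDigits s.toList
  rcases hres : s.toList.dropWhile Char.isDigit with _ | ⟨c, r⟩
  · have hdrop : s.toList.drop (countDigits s.toList) = [] := hd.trans hres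
    simp [hdrop, ht]
  · have hdrop : s.toList.drop (countDigits s.toList) = c :: r := hd.trans hres
    by_cases hc : c = '.'
    · subst hc
      have htake : s.toList.take (countDigits s.toList + 1 + countDigits r)
          = s.toList.takeWhile Char.isDigit ++ '.' :: r.takeWhile Char.isDigit := by
        have : countDigits s.toList + 1 + countDigits r
            = countDigits s.toList + (countDigits r + 1) := by omega
        rw [this, List.take_add, hdrop, ht, List.take_succ_cons, take_countDigits r]
      have hdrop2 : s.toList.drop (countDigits s.toList + 1 + countDigits r)
          = r.dropWhile Char.isDigit := by
        have : countDigits s.toList + 1 + countDigits r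
            = countDigits s.toList + (countDigits r + 1) := by omega
        rw [this, ← List.drop_drop, hdrop, List.drop_succ_cons, drop_countDigits r]
      simp [hdrop, htake, hdrop2]
    · simp [hdrop, ht, hc]
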